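-- pv_equiv track=rewrite | github.com/LRJ-2000/NNgTL | utils/task.py | convert_formula
-- ===== SOURCE A (Python) =====
-- def convert_formula(formula):
--     replacements = {
--         '||': '|',
--         '&&': '&',
--         '[]': 'G',
--         '<>': 'F',
--         'NOT': '!',
--         'TRUE': '1',
--         'FALSE': '0'
--     }
--
--     for new, old in replacements.items():
--         formula = formula.replace(old, new)
--
--     new_str = ""
--     for ch in formula:
--         if 'a' <= ch <= 'z':
--             new_str += 'e' + str(ord(ch) - 96)
--         else:
--             new_str += ch
--
--     formula = new_str.replace('TRUE', 'true').replace('FALSE', 'false')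
--
--     return formula
-- ===== SOURCE B (Python) =====
-- def convert_formula(formula):
--     table = {'|': '||', '&': '&&', 'G': '[]', 'F': '<>', '!': 'NOT',
--              '1': 'TRUE', '0': 'FALSE'}
--     s = ''.join(table[c] if c in table else
--                 ('e' + str(ord(c) - 96) if 'a' <= c <= 'z' else c)
--                 for c in formula)
--     # single left-to-right scanner with lookahead instead of the two global
--     # str.replace passes; TRUE/FALSE occurrences never overlap, so this is exact
--     out = []
--     i = 0
--     n = len(s)
--     while i < n:
--         if s.startswith('TRUE', i):
--             out.append('true')
--             i += 4
--         elif s.startswith('FALSE', i):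
--             out.append('false')
--             i += 5
--         else:
--             out.append(s[i])
--             i += 1
--     return ''.join(out)
-- ===== Notes on version B (the rewrite author's own statement) =====
-- stated objective: alternative
-- what changed: B collapses A's nine sequential str.replace passes and per-character string accumulation into two sweeps: one expansion pass over the input (dict lookup / a..z rule per character) and one hand-written left-to-right lookahead scanner that lowercases TRUE/FALSE in a single sweep with no str.replace at all; correctness of the combined scanner rests on TRUE and FALSE occurrences never overlapping.
import Mathlib
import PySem

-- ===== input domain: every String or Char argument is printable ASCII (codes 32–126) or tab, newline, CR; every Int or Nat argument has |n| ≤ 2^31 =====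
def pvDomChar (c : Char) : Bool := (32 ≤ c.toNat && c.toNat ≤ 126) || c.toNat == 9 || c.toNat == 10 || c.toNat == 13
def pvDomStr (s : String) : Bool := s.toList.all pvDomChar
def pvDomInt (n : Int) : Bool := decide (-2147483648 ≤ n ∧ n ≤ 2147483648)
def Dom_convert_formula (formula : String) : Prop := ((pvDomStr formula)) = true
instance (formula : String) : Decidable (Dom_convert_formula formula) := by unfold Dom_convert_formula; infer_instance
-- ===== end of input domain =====

-- B replaces A's seven global str.replace passes + per-character accumulation loop + two more
-- global replaces by one per-character expansion pass followed by a single left-to-right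
-- lookahead scanner that lowercases TRUE/FALSE in one sweep (no str.replace at all).

-- ===== PORT A =====
def convert_formula (formula : String) : String :=
  let f1 := PySem.Str.replace formula "|" "||"
  let f2 := PySem.Str.replace f1 "&" "&&"
  let f3 := PySem.Str.replace f2 "G" "[]"
  let f4 := PySem.Str.replace f3 "F" "<>"
  let f5 := PySem.Str.replace f4 "!" "NOT"
  let f6 := PySem.Str.replace f5 "1" "TRUE"
  let f7 := PySem.Str.replace f6 "0" "FALSE"
  let new_str := String.ofList (f7.toList.foldl
    (fun acc ch =>
      if 'a' ≤ ch ∧ ch ≤ 'z'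
      then acc ++ ('e' :: PySem.Int.toChars ((ch.toNat : Int) - 96))
      else acc ++ [ch]) [])
  PySem.Str.replace (PySem.Str.replace new_str "TRUE" "true") "FALSE" "false"

-- ===== PORT B =====
-- B's expansion table (the dict plus the a..z rule of the join comprehension)
def pvTable (c : Char) : List Char :=
  if c = '|' then "||".toList else
  if c = '&' then "&&".toList else
  if c = 'G' then "[]".toList else
  if c = 'F' then "<>".toList else
  if c = '!' then "NOT".toList else
  if c = '1' then "TRUE".toList else
  if c = '0' then "FALSE".toList else
  if 'a' ≤ c ∧ c ≤ 'z' then 'e' :: PySem.Int.toChars ((c.toNat : Int) - 96)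
  else [c]

-- B's while-loop scanner: at each position match TRUE, else FALSE, else copy one char
def pvScan (l : List Char) : List Char :=
  match l with
  | [] => []
  | c :: t =>
    if ("TRUE".toList).isPrefixOf (c :: t) then "true".toList ++ pvScan (t.drop 3)
    else if ("FALSE".toList).isPrefixOf (c :: t) then "false".toList ++ pvScan (t.drop 4)
    else c :: pvScan t
termination_by l.length
decreasing_by all_goals first
  | (simp [List.length_drop]; omega)
  | simp [List.length_drop]

def convert_formula_alt (formula : String) : String :=
  String.ofList (pvScan (formula.toList.flatMap pvTable))

-- ===== PRECONDITION & SPEC =====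
def Spec_convert_formula (formula : String) (out : String) : Prop := out = convert_formula_alt formula
instance (formula : String) (out : String) : Decidable (Spec_convert_formula formula out) := by unfold Spec_convert_formula; infer_instance

-- ===== CLAIM (what is proved, stated in full; the proofs are below) =====
def Claim_equal_convert_formula : Prop := ∀ (formula : String), Dom_convert_formula formula → Spec_convert_formula formula (convert_formula formula)

-- ===== LEMMAS AND PROOFS =====

-- replacing a single character: the per-character view of str.replace
def pvF (o : Char) (w : List Char) (x : Char) : List Char := if x = o then w else [x]

-- the per-character expansion performed by A's second loop
def pvG (ch : Char) : List Char :=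
  if 'a' ≤ ch ∧ ch ≤ 'z' then 'e' :: PySem.Int.toChars ((ch.toNat : Int) - 96) else [ch]

lemma go_single (c : Char) (new : List Char) :
    ∀ (fuel : Nat) (l acc : List Char), l.length ≤ fuel →
      PySem.Chars.replace.go [c] new fuel l acc = acc.reverse ++ l.flatMap (pvF c new) := by
  intro fuel
  induction fuel with
  | zero =>
    intro l acc h
    rw [PySem.Chars.replace.go.eq_def]
    have : l = [] := List.length_eq_zero_iff.mp (Nat.le_zero.mp h)
    subst this; simp
  | succ n ih =>
    intro l acc h
    cases l with
    | nil => rw [PySem.Chars.replace.go.eq_def]; simp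
    | cons ch t =>
      have ht : t.length ≤ n := by simpa using h
      have hred : PySem.Chars.replace.go [c] new (n + 1) (ch :: t) acc =
          (if ([c].isPrefixOf (ch :: t)) = true
           then PySem.Chars.replace.go [c] new n (List.drop [c].length (ch :: t)) (new.reverse ++ acc)
           else PySem.Chars.replace.go [c] new n t (ch :: acc)) := rfl
      rw [hred]
      have hpre : ([c].isPrefixOf (ch :: t)) = (c == ch) := by simp [List.isPrefixOf]
      rw [hpre]
      by_cases hc : c = ch
      · subst hc
        rw [if_pos (by simp)]
        have hdrop : List.drop [c].length (c :: t) = t := rfl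
        rw [hdrop, ih _ _ ht]
        simp [pvF]
      · rw [if_neg (by simp [hc]), ih _ _ ht]
        have hne : ch ≠ c := fun hh => hc hh.symm
        simp [pvF, hne]

lemma rep_single (s : List Char) (c : Char) (new : List Char) :
    PySem.Chars.replace s [c] new = s.flatMap (pvF c new) := by
  have h0 : PySem.Chars.replace s [c] new = PySem.Chars.replace.go [c] new s.length s [] := rfl
  rw [h0, go_single c new s.length s [] le_rfl]
  simp

-- the seven single-character replacements followed by the lowercase expansion,
-- composed on one character, give exactly B's table entry
lemma chain_eq (c : Char) :
    (pvF '|' "||".toList c).flatMap (fun x =>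
      (pvF '&' "&&".toList x).flatMap (fun x =>
        (pvF 'G' "[]".toList x).flatMap (fun x =>
          (pvF 'F' "<>".toList x).flatMap (fun x =>
            (pvF '!' "NOT".toList x).flatMap (fun x =>
              (pvF '1' "TRUE".toList x).flatMap (fun x =>
                (pvF '0' "FALSE".toList x).flatMap pvG)))))) = pvTable c := by
  by_cases h1 : c = '|'; · subst h1; decide
  by_cases h2 : c = '&'; · subst h2; decide
  by_cases h3 : c = 'G'; · subst h3; decide
  by_cases h4 : c = 'F'; · subst h4; decide
  by_cases h5 : c = '!'; · subst h5; decide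
  by_cases h6 : c = '1'; · subst h6; decide
  by_cases h7 : c = '0'; · subst h7; decide
  simp [pvF, pvG, pvTable, h1, h2, h3, h4, h5, h6, h7]

lemma list_eq (s : List Char) :
    List.foldl
      (fun acc ch =>
        if 'a' ≤ ch ∧ ch ≤ 'z'
        then acc ++ ('e' :: PySem.Int.toChars ((ch.toNat : Int) - 96))
        else acc ++ [ch]) []
      (PySem.Chars.replace
        (PySem.Chars.replace
          (PySem.Chars.replace
            (PySem.Chars.replace
              (PySem.Chars.replace
                (PySem.Chars.replace
                  (PySem.Chars.replace s "|".toList "||".toList)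
                  "&".toList "&&".toList)
                "G".toList "[]".toList)
              "F".toList "<>".toList)
            "!".toList "NOT".toList)
          "1".toList "TRUE".toList)
        "0".toList "FALSE".toList)
    = s.flatMap pvTable := by
  have hbody : (fun (acc : List Char) (ch : Char) =>
      if 'a' ≤ ch ∧ ch ≤ 'z'
      then acc ++ ('e' :: PySem.Int.toChars ((ch.toNat : Int) - 96))
      else acc ++ [ch]) = fun acc ch => acc ++ pvG ch := by
    funext acc ch; unfold pvG; split <;> rfl
  rw [hbody, PySem.List.foldl_append_eq_flatMap]
  have e1 : ("|" : String).toList = ['|'] := rfl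
  have e2 : ("&" : String).toList = ['&'] := rfl
  have e3 : ("G" : String).toList = ['G'] := rfl
  have e4 : ("F" : String).toList = ['F'] := rfl
  have e5 : ("!" : String).toList = ['!'] := rfl
  have e6 : ("1" : String).toList = ['1'] := rfl
  have e7 : ("0" : String).toList = ['0'] := rfl
  rw [e1, e2, e3, e4, e5, e6, e7]
  rw [rep_single, rep_single, rep_single, rep_single, rep_single, rep_single, rep_single]
  simp only [List.nil_append, List.flatMap_assoc]
  exact List.flatMap_congr (fun c _ => chain_eq c)

-- a recurrence form of str.replace for a nonempty pattern
def pvRep (p new : List Char) (l : List Char) : List Char :=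
  match l with
  | [] => []
  | c :: t =>
    if p.isPrefixOf (c :: t) then new ++ pvRep p new (t.drop (p.length - 1))
    else c :: pvRep p new t
termination_by l.length
decreasing_by all_goals first
  | (simp [List.length_drop]; omega)
  | simp [List.length_drop]

lemma go_spec (p new : List Char) (hp : p ≠ []) :
    ∀ (fuel : Nat) (l acc : List Char), l.length ≤ fuel →
      PySem.Chars.replace.go p new fuel l acc = acc.reverse ++ pvRep p new l := by
  intro fuel
  induction fuel with
  | zero =>
    intro l acc h
    have : l = [] := List.length_eq_zero_iff.mp (Nat.le_zero.mp h)
    subst this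
    rw [PySem.Chars.replace.go.eq_def, pvRep]
  | succ n ih =>
    intro l acc h
    cases l with
    | nil => rw [PySem.Chars.replace.go.eq_def, pvRep]; simp
    | cons ch t =>
      have ht : t.length ≤ n := by simpa using h
      have hred : PySem.Chars.replace.go p new (n + 1) (ch :: t) acc =
          (if (p.isPrefixOf (ch :: t)) = true
           then PySem.Chars.replace.go p new n (List.drop p.length (ch :: t)) (new.reverse ++ acc)
           else PySem.Chars.replace.go p new n t (ch :: acc)) := rfl
      rw [hred, pvRep]
      by_cases hpre : p.isPrefixOf (ch :: t) = true
      · rw [if_pos hpre, if_pos hpre]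
        obtain ⟨q, p', rfl⟩ : ∃ q p', p = q :: p' := by
          cases p with
          | nil => exact absurd rfl hp
          | cons a b => exact ⟨a, b, rfl⟩
        have hdrop : List.drop (q :: p').length (ch :: t) = t.drop ((q :: p').length - 1) := by
          simp
        rw [hdrop, ih _ _ (le_trans (by simp [List.length_drop]) ht)]
        simp
      · rw [if_neg hpre, if_neg hpre, ih _ _ ht]
        simp

lemma rep_eq (l p new : List Char) (hp : p ≠ []) :
    PySem.Chars.replace l p new = pvRep p new l := by
  have h0 : PySem.Chars.replace l p new =
      if p.isEmpty then new ++ l.flatMap (fun c => c :: new)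
      else PySem.Chars.replace.go p new l.length l [] := rfl
  rw [h0, if_neg (by simp [List.isEmpty_iff, hp]), go_spec p new hp l.length l [] le_rfl]
  simp

-- replacing TRUE by lowercase "true" cannot create a prefix made of chars outside {t,r,u,e}
lemma gen_no_create (n : Nat) :
    ∀ (l w : List Char), l.length ≤ n → (∀ c ∈ w, c ∉ (['t', 'r', 'u', 'e'] : List Char)) →
      w.isPrefixOf (pvRep "TRUE".toList "true".toList l) = true → w.isPrefixOf l = true := by
  induction n with
  | zero =>
    intro l w h hw hpre
    have : l = [] := List.length_eq_zero_iff.mp (Nat.le_zero.mp h)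
    subst this
    rw [pvRep] at hpre
    simpa using hpre
  | succ n ih =>
    intro l w h hw hpre
    cases l with
    | nil => rw [pvRep] at hpre; simpa using hpre
    | cons c t =>
      rw [pvRep] at hpre
      by_cases hT : ("TRUE".toList).isPrefixOf (c :: t) = true
      · rw [if_pos hT] at hpre
        cases w with
        | nil => simp
        | cons a w' =>
          exfalso
          have ha : a = 't' := by
            have : ("true".toList ++ pvRep "TRUE".toList "true".toList (t.drop ("TRUE".toList.length - 1)))
                = 't' :: ('r' :: 'u' :: 'e' :: pvRep "TRUE".toList "true".toList (t.drop ("TRUE".toList.length - 1))) := rfl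
            rw [this] at hpre
            simp [List.isPrefixOf] at hpre
            exact hpre.1
          exact hw a (by simp) (by simp [ha])
      · rw [if_neg hT] at hpre
        cases w with
        | nil => simp
        | cons a w' =>
          simp only [List.isPrefixOf] at hpre ⊢
          simp only [Bool.and_eq_true, beq_iff_eq] at hpre ⊢
          exact ⟨hpre.1, ih t w' (by simpa using h) (fun c hc => hw c (by simp [hc])) hpre.2⟩

lemma notT (d : Char) (t : List Char) (h : d ≠ 'T') :
    ¬ (("TRUE".toList).isPrefixOf (d :: t) = true) := by
  rw [show ("TRUE" : String).toList = 'T' :: 'R' :: 'U' :: 'E' :: [] from rfl]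
  simp only [List.isPrefixOf, Bool.and_eq_true, beq_iff_eq]
  intro hc
  exact h hc.1.symm

lemma notF (d : Char) (t : List Char) (h : d ≠ 'F') :
    ¬ (("FALSE".toList).isPrefixOf (d :: t) = true) := by
  rw [show ("FALSE" : String).toList = 'F' :: 'A' :: 'L' :: 'S' :: 'E' :: [] from rfl]
  simp only [List.isPrefixOf, Bool.and_eq_true, beq_iff_eq]
  intro hc
  exact h hc.1.symm

-- the two sequential replaces TRUE→true, FALSE→false equal B's one-sweep scanner
lemma scan_eq (n : Nat) : ∀ (l : List Char), l.length ≤ n →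
    pvRep "FALSE".toList "false".toList (pvRep "TRUE".toList "true".toList l) = pvScan l := by
  induction n with
  | zero =>
    intro l h
    have : l = [] := List.length_eq_zero_iff.mp (Nat.le_zero.mp h)
    subst this
    rw [pvRep, pvRep, pvScan]
  | succ n ih =>
    intro l h
    cases l with
    | nil => rw [pvRep, pvRep, pvScan]
    | cons c t =>
      by_cases hT : ("TRUE".toList).isPrefixOf (c :: t) = true
      · -- l starts with TRUE
        obtain ⟨t', he⟩ : ∃ t', c :: t = 'T' :: 'R' :: 'U' :: 'E' :: t' := by
          have hpfx : ("TRUE".toList) <+: (c :: t) := List.isPrefixOf_iff_prefix.mp hT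
          obtain ⟨r, hr⟩ := hpfx
          exact ⟨r, hr.symm⟩
        rw [he] at hT h ⊢
        have h1 : pvRep "TRUE".toList "true".toList ('T' :: 'R' :: 'U' :: 'E' :: t')
            = 't' :: 'r' :: 'u' :: 'e' :: pvRep "TRUE".toList "true".toList t' := by
          rw [pvRep, if_pos hT]
          rfl
        rw [h1]
        have ht' : t'.length ≤ n := by simp at h; omega
        have step : ∀ x, pvRep "FALSE".toList "false".toList ('t' :: 'r' :: 'u' :: 'e' :: x)
            = 't' :: 'r' :: 'u' :: 'e' :: pvRep "FALSE".toList "false".toList x := by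
          intro x
          rw [pvRep, if_neg (notF 't' _ (by decide))]
          rw [pvRep, if_neg (notF 'r' _ (by decide))]
          rw [pvRep, if_neg (notF 'u' _ (by decide))]
          rw [pvRep, if_neg (notF 'e' _ (by decide))]
        rw [step, ih t' ht']
        rw [pvScan, if_pos hT]
        rfl
      · by_cases hF : ("FALSE".toList).isPrefixOf (c :: t) = true
        · -- l starts with FALSE
          obtain ⟨t', he⟩ : ∃ t', c :: t = 'F' :: 'A' :: 'L' :: 'S' :: 'E' :: t' := by
            have hpfx : ("FALSE".toList) <+: (c :: t) := List.isPrefixOf_iff_prefix.mp hF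
            obtain ⟨r, hr⟩ := hpfx
            exact ⟨r, hr.symm⟩
          rw [he] at hT hF h ⊢
          have h1 : pvRep "TRUE".toList "true".toList ('F' :: 'A' :: 'L' :: 'S' :: 'E' :: t')
              = 'F' :: 'A' :: 'L' :: 'S' :: 'E' :: pvRep "TRUE".toList "true".toList t' := by
            rw [pvRep, if_neg (notT 'F' _ (by decide))]
            rw [pvRep, if_neg (notT 'A' _ (by decide))]
            rw [pvRep, if_neg (notT 'L' _ (by decide))]
            rw [pvRep, if_neg (notT 'S' _ (by decide))]
            rw [pvRep, if_neg (notT 'E' _ (by decide))]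
          rw [h1]
          have h2 : pvRep "FALSE".toList "false".toList
              ('F' :: 'A' :: 'L' :: 'S' :: 'E' :: pvRep "TRUE".toList "true".toList t')
              = 'f' :: 'a' :: 'l' :: 's' :: 'e' :: pvRep "FALSE".toList "false".toList
                  (pvRep "TRUE".toList "true".toList t') := by
            rw [pvRep, if_pos (by simp [List.isPrefixOf])]
            rfl
          rw [h2]
          have ht' : t'.length ≤ n := by simp at h; omega
          rw [ih t' ht', pvScan, if_neg hT, if_pos hF]
          rfl
        · -- neither matches at this position
          have h1 : pvRep "TRUE".toList "true".toList (c :: t)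
              = c :: pvRep "TRUE".toList "true".toList t := by
            rw [pvRep, if_neg hT]
          rw [h1]
          have hnf : ("FALSE".toList).isPrefixOf (c :: pvRep "TRUE".toList "true".toList t) ≠ true := by
            intro hcontra
            have : ("FALSE".toList) = 'F' :: "ALSE".toList := rfl
            rw [this] at hcontra
            simp only [List.isPrefixOf, Bool.and_eq_true, beq_iff_eq] at hcontra
            obtain ⟨hc, hrest⟩ := hcontra
            have := gen_no_create t.length t ("ALSE".toList) le_rfl (by
              intro c hc
              rw [show ("ALSE" : String).toList = ['A', 'L', 'S', 'E'] from rfl] at hc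
              simp only [List.mem_cons, List.not_mem_nil, or_false] at hc
              rcases hc with rfl | rfl | rfl | rfl <;> decide) hrest
            apply hF
            rw [show ("FALSE".toList) = 'F' :: "ALSE".toList from rfl]
            simp only [List.isPrefixOf, Bool.and_eq_true, beq_iff_eq]
            exact ⟨hc, this⟩
          have h2 : pvRep "FALSE".toList "false".toList (c :: pvRep "TRUE".toList "true".toList t)
              = c :: pvRep "FALSE".toList "false".toList (pvRep "TRUE".toList "true".toList t) := by
            rw [pvRep, if_neg hnf]
          rw [h2, ih t (by simpa using h), pvScan, if_neg hT, if_neg hF]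

-- ===== VERDICT (by name: the statement is the Claim_ definition above) =====
theorem convert_formula_spec : Claim_equal_convert_formula := by
  unfold Claim_equal_convert_formula Spec_convert_formula
  intro formula _
  apply String.toList_inj.mp
  simp only [convert_formula, convert_formula_alt, PySem.Str.toList_replace, String.toList_ofList]
  rw [list_eq formula.toList]
  rw [rep_eq _ _ _ (by decide), rep_eq _ _ _ (by decide)]
  exact scan_eq _ _ le_rfl
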